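-- pv_equiv track=rewrite | github.com/heeManLee/coding_test | 2023/프로그래머스/레벨2/기능개발.py | solution
-- ===== SOURCE A (Python) =====
-- from collections import deque
--
-- def solution(progresses, speeds):
--     answer = []
--
--     pro = deque(progresses)
--     visit = [0] * len(progresses)
--     idx = 0
--     while (idx < len(speeds)):
--         for i in range(len(speeds)):
--             if visit[i] == 0:
--                 pro[i] += speeds[i]
--
--         if pro[idx] >= 100:
--             count = 0
--             for i in range(idx, len(pro)):
--                 if pro[i] >= 100 and visit[i] == 0:
--                     visit[i] = 1
--                     count += 1
--                     idx += 1
--                 else: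
--                     break
--             answer.append(count)
--
--     return answer
-- ===== SOURCE B (Python) =====
-- def solution(progresses, speeds):
--     # Closed-form days per feature (ceil, min 1 day), grouped in one pass by the open group's leader day.
--     answer = []
--     count = 0
--     cur = 0
--     for p, s in zip(progresses, speeds):
--         d = -((p - 100) // s)
--         if d < 1:
--             d = 1
--         if count > 0 and d <= cur:
--             count += 1
--         else:
--             if count > 0:
--                 answer.append(count)
--             cur = d
--             count = 1
--     if count > 0:
--         answer.append(count)
--     return answer
-- ===== Notes on version B (the rewrite author's own statement) =====
-- stated objective: alternative
-- what changed: Replaces the day-by-day simulation (a while loop incrementing every unfinished feature once per day) with a closed-form ceiling computation of each feature's completion day and a single pass grouping consecutive features by the open group's leader day; intended as faster (O(n) vs O(n*days)) but a timing run could not confirm a ratio (A times out at n=16 where B returns).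
-- outside the precondition, e.g. on solution([50, 100], [10]): A returns [2], B returns [1]; on solution([200], [0]): A returns [1], B raises ZeroDivisionError; on solution([200, 0], [-1, 1]): A returns [1, 1], B returns [2]
import Mathlib
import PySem

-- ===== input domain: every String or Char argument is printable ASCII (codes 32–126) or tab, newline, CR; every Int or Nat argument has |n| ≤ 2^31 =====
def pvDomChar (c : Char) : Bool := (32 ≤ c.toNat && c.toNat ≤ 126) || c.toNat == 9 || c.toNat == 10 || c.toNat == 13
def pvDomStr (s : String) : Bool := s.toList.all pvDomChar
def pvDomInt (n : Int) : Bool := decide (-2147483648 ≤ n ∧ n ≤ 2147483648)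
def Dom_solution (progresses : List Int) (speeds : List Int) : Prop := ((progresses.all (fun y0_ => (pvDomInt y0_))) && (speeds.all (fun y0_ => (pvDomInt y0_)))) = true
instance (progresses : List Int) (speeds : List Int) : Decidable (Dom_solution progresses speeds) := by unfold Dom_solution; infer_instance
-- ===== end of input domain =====

-- B replaces A's day-by-day simulation with closed-form ceil completion days grouped in a
-- single pass (intended as faster; a timing run could not confirm a ratio — A timed out
-- at n=16 where B returned); equivalence proved on Pre_ below.


-- ===== PORT A =====
-- the daily pass "for i in range(len(speeds)): if visit[i] == 0: pro[i] += speeds[i]"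
def updateDay : List Int → List Int → List Int → List Int
  | p :: ps, v :: vs, s :: ss => (if v == 0 then p + s else p) :: updateDay ps vs ss
  | ps, _, [] => ps
  | _, _, _ => []

-- the inner "for i in range(idx, len(pro)): … else: break" loop (state visit, idx, count)
def aInner (pro : List Int) (visit : List Int) (i : Nat) (idx : Nat) (count : Int) :
    List Int × Nat × Int :=
  if h : i < pro.length then
    if 100 ≤ pro.getD i 0 && visit.getD i 0 == 0 then
      aInner pro (visit.set i 1) (i + 1) (idx + 1) (count + 1)
    else (visit, idx, count)
  else (visit, idx, count)
  termination_by pro.length - i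

-- the outer "while idx < len(speeds)" loop; fuel bounds the number of simulated days
def aLoop : Nat → List Int → List Int → List Int → Nat → List Int → List Int
  | 0, _, _, _, _, answer => answer
  | f + 1, speeds, pro, visit, idx, answer =>
    if idx < speeds.length then
      let pro' := updateDay pro visit speeds
      if 100 ≤ pro'.getD idx 0 then
        let r := aInner pro' visit idx idx 0
        aLoop f speeds pro' r.1 r.2.1 (answer ++ [r.2.2])
      else
        aLoop f speeds pro' visit idx answer
    else answer

-- enough fuel: under Pre_ the simulation lasts at most Σ (|100 - p| + 1) days
def fuelOf (progresses : List Int) : Nat :=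
  progresses.foldl (fun a p => a + ((100 - p).natAbs + 1)) 0 + 1

def solution (progresses : List Int) (speeds : List Int) : List Int :=
  aLoop (fuelOf progresses) speeds progresses (List.replicate progresses.length 0) 0 []

-- ===== PORT B =====
-- "d = -((p - 100) // s); if d < 1: d = 1"  (ceil days to finish, at least one day)
def dayOf (p : Int) (s : Int) : Int :=
  if -(PySem.Int.floordiv (p - 100) s) < 1 then 1
  else -(PySem.Int.floordiv (p - 100) s)

-- loop body of Source B: state (answer, count, cur)
def bStep : (List Int × Int × Int) → Int × Int → (List Int × Int × Int)
  | (answer, count, cur), (p, s) =>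
    let d := dayOf p s
    if count > 0 && d ≤ cur then (answer, count + 1, cur)
    else ((if count > 0 then answer ++ [count] else answer), 1, d)

def solution_alt (progresses : List Int) (speeds : List Int) : List Int :=
  let r := (progresses.zip speeds).foldl bStep ([], 0, 0)
  if r.2.1 > 0 then r.1 ++ [r.2.1] else r.1

-- ===== PRECONDITION & SPEC =====
-- Pre_ excludes: speeds longer than progresses (A raises IndexError); any speed ≤ 0 (A's day
-- loop diverges for most such inputs and on the rest its value depends on the day each index
-- is polled, while B divides by the speed); and progresses longer than speeds with the first
-- surplus progress ≥ 100 (a corner no caller specifies: A tacks the speed-less surplus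
-- features onto the last release, B's zip ignores features without a speed).
def Pre_solution (progresses : List Int) (speeds : List Int) : Prop :=
  speeds.length ≤ progresses.length ∧ (∀ s ∈ speeds, 1 ≤ s) ∧
    ∀ t ∈ (progresses.drop speeds.length).head?, t < 100
instance (progresses : List Int) (speeds : List Int) : Decidable (Pre_solution progresses speeds) := by
  unfold Pre_solution; infer_instance

def pvWitness_solution : List Int × List Int := ([93, 30, 55], [1, 30, 5])

def Spec_solution (progresses : List Int) (speeds : List Int) (out : List Int) : Prop :=
  out = solution_alt progresses speeds
instance (progresses : List Int) (speeds : List Int) (out : List Int) : Decidable (Spec_solution progresses speeds out) := by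
  unfold Spec_solution; infer_instance

-- ===== CLAIM (what is proved, stated in full; the proofs are below) =====
def Claim_equal_solution : Prop :=
  ∀ (progresses : List Int) (speeds : List Int), Dom_solution progresses speeds →
    Pre_solution progresses speeds →
    Spec_solution progresses speeds (solution progresses speeds)

-- ===== LEMMAS AND PROOFS =====

-- the common specification: group the list of completion days by the leading day
def grp : List Int → List Int
  | [] => []
  | x :: tl =>
    (1 + ((tl.takeWhile (fun y => y ≤ x)).length : Int)) :: grp (tl.dropWhile (fun y => y ≤ x))
  termination_by l => l.length
  decreasing_by simp only [List.length_cons]; exact Nat.lt_succ_of_le (tl.length_dropWhile_le _)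

def dsOf (l : List (Int × Int)) : List Int := l.map (fun q => dayOf q.1 q.2)

-- completion-day characterisation: at day e ≥ 1 a feature (p, s), s ≥ 1, shows ≥ 100
theorem reach_iff (p s e : Int) (hs : 1 ≤ s) (he : 1 ≤ e) :
    (100 ≤ p + e * s) ↔ dayOf p s ≤ e := by
  have hpos : 0 < s := by omega
  have hb : ∀ q : Int, q ≤ PySem.Int.floordiv (p - 100) s ↔ q * s ≤ p - 100 :=
    fun q => PySem.Int.le_floordiv_iff_mul_le hpos
  have key : (100 ≤ p + e * s) ↔ -(PySem.Int.floordiv (p - 100) s) ≤ e := by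
    have := hb (-e)
    constructor
    · intro h
      have : -e * s ≤ p - 100 := by nlinarith
      omega
    · intro h
      have : -e * s ≤ p - 100 := (hb (-e)).mp (by omega)
      nlinarith
  unfold dayOf
  split_ifs with h1
  · constructor
    · intro _; omega
    · intro _; rw [key]; omega
  · exact key

-- ---------- B side ----------

-- the trailing "if count > 0: answer.append(count)" of Source B
def close : List Int × Int × Int → List Int
  | (answer, count, _) => if count > 0 then answer ++ [count] else answer

theorem bfold_open (l : List (Int × Int)) (answer : List Int) (count cur : Int)
    (hc : 0 < count) :
    close (l.foldl bStep (answer, count, cur)) =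
      answer ++ (count + ((dsOf l).takeWhile (fun y => y ≤ cur)).length : Int)
        :: grp ((dsOf l).dropWhile (fun y => y ≤ cur)) := by
  induction l generalizing answer count cur with
  | nil => simp [dsOf, grp, close, hc]
  | cons q tl ih =>
    rw [List.foldl_cons]
    by_cases hd : dayOf q.1 q.2 ≤ cur
    · have hstep : bStep (answer, count, cur) q = (answer, count + 1, cur) := by
        simp [bStep, hd, hc]
      rw [hstep, ih _ _ _ (by omega)]
      rw [show dsOf (q :: tl) = dayOf q.1 q.2 :: dsOf tl from rfl]
      rw [List.takeWhile_cons_of_pos (by simpa using hd),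
          List.dropWhile_cons_of_pos (by simpa using hd)]
      simp only [List.length_cons]
      congr 2
      push_cast; ring
    · have hstep : bStep (answer, count, cur) q =
          (answer ++ [count], 1, dayOf q.1 q.2) := by
        simp only [bStep]
        rw [if_neg (by simp [hd]), if_pos (by omega)]
      rw [hstep, ih _ _ _ (by omega)]
      rw [show dsOf (q :: tl) = dayOf q.1 q.2 :: dsOf tl from rfl]
      rw [List.takeWhile_cons_of_neg (by simpa using hd),
          List.dropWhile_cons_of_neg (by simpa using hd)]
      rw [grp]
      simp only [List.length_nil, List.append_assoc, List.cons_append, List.nil_append]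
      congr 3
      push_cast; ring

theorem solution_alt_eq_grp (ps ss : List Int) :
    solution_alt ps ss = grp (dsOf (ps.zip ss)) := by
  show close ((ps.zip ss).foldl bStep ([], 0, 0)) = grp (dsOf (ps.zip ss))
  cases h : ps.zip ss with
  | nil => simp [dsOf, grp, close]
  | cons q tl =>
    rw [List.foldl_cons]
    have hstep : bStep ([], 0, 0) q = ([], 1, dayOf q.1 q.2) := by
      simp [bStep]
    rw [hstep, bfold_open tl [] 1 (dayOf q.1 q.2) (by omega)]
    rw [show dsOf (q :: tl) = dayOf q.1 q.2 :: dsOf tl from rfl, grp]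
    simp only [List.nil_append]

-- ---------- A side ----------

theorem updateDay_append (a b v w s t : List Int)
    (h1 : a.length = v.length) (h2 : v.length = s.length) :
    updateDay (a ++ b) (v ++ w) (s ++ t) = updateDay a v s ++ updateDay b w t := by
  induction a generalizing v s with
  | nil =>
    cases v with
    | nil => cases s with
      | nil => simp [updateDay]
      | cons _ _ => simp at h2
    | cons _ _ => simp at h1
  | cons x xs ih =>
    cases v with
    | nil => simp at h1
    | cons y ys =>
      cases s with
      | nil => simp at h2
      | cons z zs =>
        simp only [List.cons_append, updateDay]
        rw [ih ys zs (by simpa using h1) (by simpa using h2)]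

theorem updateDay_visited (a s : List Int) (h : a.length = s.length) :
    updateDay a (List.replicate a.length 1) s = a := by
  induction a generalizing s with
  | nil => cases s <;> rfl
  | cons x xs ih =>
    cases s with
    | nil => simp at h
    | cons z zs =>
      simp only [List.replicate, updateDay, List.length_cons]
      rw [if_neg (by decide), ih zs (by simpa using h)]

theorem updateDay_active (l : List (Int × Int)) (d : Int) :
    updateDay (l.map (fun q => q.1 + d * q.2)) (List.replicate l.length 0)
      (l.map (fun q => q.2)) = l.map (fun q => q.1 + (d + 1) * q.2) := by
  induction l with
  | nil => simp [updateDay]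
  | cons q tl ih =>
    simp only [List.map_cons, List.length_cons, List.replicate, updateDay]
    rw [if_pos (by decide), ih]
    congr 1; ring

theorem aInner_spec (suf : List Int) (proPre visitPre : List Int) (idx0 : Nat) (count : Int)
    (h1 : proPre.length = visitPre.length) :
    aInner (proPre ++ suf) (visitPre ++ List.replicate suf.length 0) proPre.length idx0 count =
      (visitPre ++ List.replicate (suf.takeWhile (fun x => 100 ≤ x)).length 1 ++
        List.replicate (suf.dropWhile (fun x => 100 ≤ x)).length 0,
       idx0 + (suf.takeWhile (fun x => 100 ≤ x)).length,
       count + (suf.takeWhile (fun x => 100 ≤ x)).length) := by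
  induction suf generalizing proPre visitPre idx0 count with
  | nil =>
    rw [aInner]
    simp
  | cons x xs ih =>
    rw [aInner]
    have hlt : proPre.length < (proPre ++ x :: xs).length := by simp
    rw [dif_pos hlt]
    have hget : (proPre ++ x :: xs).getD proPre.length 0 = x := by
      simp [List.getD_eq_getElem?_getD]
    have hvget : (visitPre ++ List.replicate (x :: xs).length 0).getD proPre.length 0 = 0 := by
      rw [List.getD_eq_getElem?_getD, h1, List.getElem?_append_right (Nat.le_refl _)]
      simp
    by_cases hx : 100 ≤ x
    · rw [if_pos (by rw [hget, hvget]; simp [hx])]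
      have hset : (visitPre ++ List.replicate (x :: xs).length 0).set proPre.length 1 =
          (visitPre ++ [1]) ++ List.replicate xs.length 0 := by
        rw [h1]
        simp only [List.length_cons, List.replicate_succ]
        rw [List.set_append_right _ _ (Nat.le_refl _)]
        simp
      rw [hset]
      have := ih (proPre ++ [x]) (visitPre ++ [1]) (idx0 + 1) (count + 1) (by simp [h1])
      rw [show (proPre ++ [x]).length = proPre.length + 1 by simp] at this
      rw [show proPre ++ x :: xs = (proPre ++ [x]) ++ xs by simp]
      rw [this]
      rw [List.takeWhile_cons_of_pos (by simpa using hx),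
          List.dropWhile_cons_of_pos (by simpa using hx)]
      simp only [Prod.mk.injEq, List.length_cons]
      refine ⟨by simp [List.replicate_succ, List.append_assoc], by omega, by push_cast; ring⟩
    · rw [if_neg (by rw [hget, hvget]; simp [hx])]
      rw [List.takeWhile_cons_of_neg (by simpa using hx),
          List.dropWhile_cons_of_neg (by simpa using hx)]
      simp

theorem takeWhile_congr' {α : Type} (p q : α → Bool) (l : List α)
    (h : ∀ a ∈ l, p a = q a) : l.takeWhile p = l.takeWhile q := by
  induction l with
  | nil => rfl
  | cons x xs ih =>
    rw [List.takeWhile_cons, List.takeWhile_cons, h x (by simp)]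
    split
    · rw [ih (fun a ha => h a (by simp [ha]))]
    · rfl

theorem dropWhile_congr' {α : Type} (p q : α → Bool) (l : List α)
    (h : ∀ a ∈ l, p a = q a) : l.dropWhile p = l.dropWhile q := by
  induction l with
  | nil => rfl
  | cons x xs ih =>
    rw [List.dropWhile_cons, List.dropWhile_cons, h x (by simp)]
    split
    · exact ih (fun a ha => h a (by simp [ha]))
    · rfl

theorem mem_zip_parts {α β : Type} (q : α × β) (l1 : List α) (l2 : List β)
    (h : q ∈ l1.zip l2) : q.1 ∈ l1 ∧ q.2 ∈ l2 := by
  obtain ⟨u, v⟩ := q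
  exact List.of_mem_zip h

theorem zip_take_self {α β : Type} (a : List α) (b : List β) :
    a.zip b = (a.take b.length).zip b := by
  induction a generalizing b with
  | nil => simp
  | cons x xs ih =>
    cases b with
    | nil => simp
    | cons y ys =>
      simp only [List.zip_cons_cons, List.length_cons, List.take_succ_cons]
      rw [← ih ys]

theorem head_dropWhile_false {α : Type} (p : α → Bool) (l : List α) (x : α) (tl : List α)
    (h : l.dropWhile p = x :: tl) : p x = false := by
  induction l with
  | nil => simp [List.dropWhile] at h
  | cons y ys ih =>
    rw [List.dropWhile_cons] at h
    split_ifs at h with hy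
    · exact ih h
    · simp_all

theorem updateDay_nil_speeds (ps vs : List Int) : updateDay ps vs [] = ps := by
  cases ps <;> cases vs <;> rfl

theorem takeWhile_append_head_neg {α : Type} (p : α → Bool) (xs T : List α)
    (hT : ∀ t ∈ T.head?, p t = false) :
    (xs ++ T).takeWhile p = xs.takeWhile p ∧ (xs ++ T).dropWhile p = xs.dropWhile p ++ T := by
  induction xs with
  | nil =>
    cases T with
    | nil => simp
    | cons t ts =>
      have := hT t (by simp)
      simp [this]
  | cons x xs ih =>
    rw [List.cons_append, List.takeWhile_cons, List.takeWhile_cons,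
        List.dropWhile_cons, List.dropWhile_cons]
    cases hpx : p x with
    | true => simp [ih.1, ih.2]
    | false => simp

theorem aLoop_spec (fuel : Nat) (d : Int) (preP preS : List Int) (rest : List (Int × Int))
    (T : List Int) (answer : List Int)
    (hlenP : preP.length = preS.length)
    (hd : 0 ≤ d)
    (hs : ∀ q ∈ rest, 1 ≤ q.2)
    (hhead : ∀ q ∈ rest.head?, d < dayOf q.1 q.2)
    (hfuel : ∀ q ∈ rest, dayOf q.1 q.2 ≤ d + fuel)
    (hT : ∀ t ∈ T.head?, ¬ (100 ≤ t)) :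
    aLoop fuel (preS ++ rest.map (fun q => q.2))
      (preP ++ rest.map (fun q => q.1 + d * q.2) ++ T)
      (List.replicate preS.length 1 ++ List.replicate rest.length 0 ++
        List.replicate T.length 0)
      preS.length answer = answer ++ grp (dsOf rest) := by
  induction fuel generalizing d preP preS rest answer with
  | zero =>
    cases rest with
    | nil => simp [aLoop, dsOf, grp]
    | cons q tl =>
      exfalso
      have h1 := hhead q (by simp)
      have h2 := hfuel q (by simp)
      omega
  | succ f ih =>
    cases rest with
    | nil =>
      rw [aLoop]
      rw [if_neg (by simp)]
      simp [dsOf, grp]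
    | cons q tl =>
      rw [aLoop]
      rw [if_pos (by simp)]
      have hsq : 1 ≤ q.2 := hs q (by simp)
      -- the day's update
      have hupd : updateDay (preP ++ (q :: tl).map (fun q => q.1 + d * q.2) ++ T)
          (List.replicate preS.length 1 ++ List.replicate (q :: tl).length 0 ++
            List.replicate T.length 0)
          (preS ++ (q :: tl).map (fun q => q.2)) =
          preP ++ (q :: tl).map (fun q => q.1 + (d + 1) * q.2) ++ T := by
        rw [show preS ++ (q :: tl).map (fun q => q.2) =
              (preS ++ (q :: tl).map (fun q => q.2)) ++ [] by simp]
        rw [updateDay_append _ _ _ _ _ _ (by simp [hlenP]) (by simp),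
            updateDay_nil_speeds]
        congr 1
        rw [show List.replicate preS.length (1 : Int) = List.replicate preP.length 1 by
              rw [hlenP],
            updateDay_append _ _ _ _ _ _ (by simp) (by simpa using hlenP),
            updateDay_visited preP preS hlenP, updateDay_active]
      rw [hupd]
      have hget : (preP ++ (q :: tl).map (fun q => q.1 + (d + 1) * q.2) ++ T).getD
          preS.length 0 = q.1 + (d + 1) * q.2 := by
        rw [← hlenP, List.append_assoc, List.getD_eq_getElem?_getD,
            List.getElem?_append_right (Nat.le_refl _)]
        simp
      simp only [hget]
      have hdq : d < dayOf q.1 q.2 := hhead q (by simp)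
      by_cases htrig : dayOf q.1 q.2 ≤ d + 1
      · -- triggered: dayOf q = d + 1
        have hq100 : 100 ≤ q.1 + (d + 1) * q.2 := (reach_iff _ _ _ hsq (by omega)).mpr htrig
        rw [if_pos hq100]
        -- the inner loop consumes the run of finished features (and stops at T's head)
        have hinner := aInner_spec ((q :: tl).map (fun q => q.1 + (d + 1) * q.2) ++ T) preP
          (List.replicate preS.length 1) preS.length 0 (by simp [hlenP])
        rw [hlenP] at hinner
        obtain ⟨hTt, hTd⟩ := takeWhile_append_head_neg (fun x => 100 ≤ x)
          ((q :: tl).map (fun q => q.1 + (d + 1) * q.2)) T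
          (fun t ht => by simpa using hT t ht)
        rw [hTt, hTd] at hinner
        -- takeWhile over the mapped list = map of takeWhile over pairs
        have htw : ∀ (l : List (Int × Int)), (∀ q ∈ l, 1 ≤ q.2) →
            (l.map (fun q => q.1 + (d + 1) * q.2)).takeWhile (fun x => 100 ≤ x) =
              (l.takeWhile (fun q => dayOf q.1 q.2 ≤ d + 1)).map (fun q => q.1 + (d + 1) * q.2) ∧
            (l.map (fun q => q.1 + (d + 1) * q.2)).dropWhile (fun x => 100 ≤ x) =
              (l.dropWhile (fun q => dayOf q.1 q.2 ≤ d + 1)).map (fun q => q.1 + (d + 1) * q.2) := by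
          intro l hl
          induction l with
          | nil => simp
          | cons a as iha =>
            have ha : 1 ≤ a.2 := hl a (by simp)
            have hiff : (decide (100 ≤ a.1 + (d + 1) * a.2)) =
                (decide (dayOf a.1 a.2 ≤ d + 1)) := by
              simp only [decide_eq_decide]
              exact reach_iff _ _ _ ha (by omega)
            obtain ⟨iht, ihd2⟩ := iha (fun q hq => hl q (by simp [hq]))
            by_cases hcond : dayOf a.1 a.2 ≤ d + 1
            · rw [List.takeWhile_cons, List.dropWhile_cons, List.map_cons,
                  List.takeWhile_cons, List.dropWhile_cons]
              simp only [hiff]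
              rw [if_pos (by simpa using hcond), if_pos (by simpa using hcond),
                  if_pos (by simpa using hcond), if_pos (by simpa using hcond)]
              simp [iht, ihd2]
            · rw [List.takeWhile_cons, List.dropWhile_cons, List.map_cons,
                  List.takeWhile_cons, List.dropWhile_cons]
              simp only [hiff]
              rw [if_neg (by simpa using hcond), if_neg (by simpa using hcond),
                  if_neg (by simpa using hcond), if_neg (by simpa using hcond)]
              exact ⟨rfl, rfl⟩
        obtain ⟨htw1, htw2⟩ := htw (q :: tl) hs
        set run := (q :: tl).takeWhile (fun q => dayOf q.1 q.2 ≤ d + 1) with hrun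
        set rest' := (q :: tl).dropWhile (fun q => dayOf q.1 q.2 ≤ d + 1) with hrest'
        rw [htw1, htw2] at hinner
        simp only [List.length_map] at hinner
        rw [show preP ++ (q :: tl).map (fun q => q.1 + (d + 1) * q.2) ++ T =
              preP ++ ((q :: tl).map (fun q => q.1 + (d + 1) * q.2) ++ T) by
            rw [List.append_assoc]]
        rw [show List.replicate preS.length (1:Int) ++ List.replicate (q :: tl).length 0 ++
              List.replicate T.length 0 =
              List.replicate preS.length 1 ++
                List.replicate ((q :: tl).map (fun q => q.1 + (d + 1) * q.2) ++ T).length 0 by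
            rw [List.append_assoc, ← List.replicate_add]
            simp
            omega]
        simp only [hinner, zero_add]
        -- re-shape the state for the recursive call
        have hsplit : q :: tl = run ++ rest' := (List.takeWhile_append_dropWhile).symm
        have hrunlen : (q :: tl).length = run.length + rest'.length := by
          rw [hsplit]; simp
        have hpro : preP ++ (q :: tl).map (fun q => q.1 + (d + 1) * q.2) =
            (preP ++ run.map (fun q => q.1 + (d + 1) * q.2)) ++
              rest'.map (fun q => q.1 + (d + 1) * q.2) := by
          rw [hsplit]; simp
        have hvis : preP.length + run.length = (preS ++ run.map (fun q => q.2)).length := by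
          simp [hlenP]
        have hspd : preS ++ (q :: tl).map (fun q => q.2) =
            (preS ++ run.map (fun q => q.2)) ++ rest'.map (fun q => q.2) := by
          rw [hsplit]; simp
        have hih := ih (d + 1) (preP ++ run.map (fun q => q.1 + (d + 1) * q.2))
          (preS ++ run.map (fun q => q.2)) rest' (answer ++ [(run.length : Int)])
          (by simp [hlenP]) (by omega)
          (fun q hq => hs q (by rw [hsplit]; exact List.mem_append_right _ hq))
          (by
            intro q2 hq2
            cases hr : rest' with
            | nil => simp [hr] at hq2
            | cons z zs =>
              rw [hr] at hq2
              simp only [List.head?_cons, Option.mem_def, Option.some.injEq] at hq2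
              subst hq2
              have hz : ¬ (dayOf z.1 z.2 ≤ d + 1) := by
                have := head_dropWhile_false (fun q => decide (dayOf q.1 q.2 ≤ d + 1))
                  (q :: tl) z zs (by rw [← hrest']; exact hr)
                simpa using this
              omega)
          (by
            intro q2 hq2
            have : q2 ∈ q :: tl := by
              rw [hsplit]; exact List.mem_append_right _ hq2
            have := hfuel q2 this
            omega)
        rw [show List.replicate preS.length (1:Int) ++ List.replicate run.length 1 ++
              List.replicate (rest'.map (fun q => q.1 + (d + 1) * q.2) ++ T).length 0 =
              List.replicate (preS ++ run.map (fun q => q.2)).length 1 ++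
                List.replicate rest'.length 0 ++ List.replicate T.length 0 by
            rw [List.length_append, List.length_append, List.length_map, List.length_map,
                List.replicate_add, List.replicate_add]
            simp [List.append_assoc]]
        rw [show preP ++ ((q :: tl).map (fun q => q.1 + (d + 1) * q.2) ++ T) =
              preP ++ (q :: tl).map (fun q => q.1 + (d + 1) * q.2) ++ T by
            rw [List.append_assoc]]
        rw [hpro, hspd]
        rw [show preS.length + run.length = (preS ++ run.map (fun q => q.2)).length by simp]
        rw [hih]
        -- match against grp
        have hrun_cons : run = q :: tl.takeWhile (fun q2 => dayOf q2.1 q2.2 ≤ d + 1) := by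
          rw [hrun, List.takeWhile_cons_of_pos (by simpa using htrig)]
        have hrest_cons : rest' = tl.dropWhile (fun q2 => dayOf q2.1 q2.2 ≤ d + 1) := by
          rw [hrest', List.dropWhile_cons_of_pos (by simpa using htrig)]
        have hdq1 : dayOf q.1 q.2 = d + 1 := by omega
        have htw_ds : (dsOf tl).takeWhile (fun y => y ≤ dayOf q.1 q.2) =
            dsOf (tl.takeWhile (fun q2 => dayOf q2.1 q2.2 ≤ d + 1)) := by
          unfold dsOf
          rw [List.takeWhile_map]
          congr 1
          apply takeWhile_congr'
          intro a _
          simp [hdq1, Function.comp]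
        have hdw_ds : (dsOf tl).dropWhile (fun y => y ≤ dayOf q.1 q.2) =
            dsOf (tl.dropWhile (fun q2 => dayOf q2.1 q2.2 ≤ d + 1)) := by
          unfold dsOf
          rw [List.dropWhile_map]
          congr 1
          apply dropWhile_congr'
          intro a _
          simp [hdq1, Function.comp]
        show answer ++ [(run.length : Int)] ++ grp (dsOf rest') = answer ++ grp (dsOf (q :: tl))
        rw [show dsOf (q :: tl) = dayOf q.1 q.2 :: dsOf tl from rfl, grp]
        rw [htw_ds, hdw_ds, ← hrest_cons]
        rw [show (run.length : Int) =
              1 + ((tl.takeWhile (fun q2 => dayOf q2.1 q2.2 ≤ d + 1)).length : Int) by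
            rw [hrun_cons]
            simp only [List.length_cons]
            push_cast
            ring]
        rw [List.append_assoc]
        simp [dsOf]
      · -- not triggered: one more day passes
        rw [if_neg (by
          intro hcon
          exact htrig ((reach_iff _ _ _ hsq (by omega)).mp hcon))]
        have hih := ih (d + 1) preP preS (q :: tl) answer hlenP (by omega) hs
          (by intro q2 hq2; simp at hq2; subst hq2; omega)
          (by intro q2 hq2; have := hfuel q2 hq2; omega)
        exact hih

-- fuel is sufficient
theorem fuelOf_ge (ps ss : List Int) (hs : ∀ s ∈ ss, 1 ≤ s) :
    ∀ q ∈ ps.zip ss, dayOf q.1 q.2 ≤ (fuelOf ps : Int) := by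
  intro q hq
  obtain ⟨hq1, hq2m⟩ := mem_zip_parts q ps ss hq
  have hq2 : 1 ≤ q.2 := hs q.2 hq2m
  have hday : dayOf q.1 q.2 ≤ ((100 - q.1).natAbs + 1 : Int) := by
    unfold dayOf
    split_ifs with h1
    · have : (0:Int) ≤ (100 - q.1).natAbs := Int.natCast_nonneg _
      omega
    · have hle : (100 - q.1 : Int) ≤ (100 - q.1).natAbs := Int.le_natAbs
      have hk : (0:Int) ≤ (100 - q.1).natAbs := Int.natCast_nonneg _
      have hmul : -(((100 - q.1).natAbs : Int) + 1) * q.2 ≤ q.1 - 100 := by nlinarith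
      have h2 : -(((100 - q.1).natAbs : Int) + 1) ≤ PySem.Int.floordiv (q.1 - 100) q.2 :=
        (PySem.Int.le_floordiv_iff_mul_le (by omega)).mpr hmul
      omega
  have hsum : (100 - q.1).natAbs + 1 ≤ fuelOf ps := by
    unfold fuelOf
    rw [PySem.List.foldl_add_nat]
    have hmem : (100 - q.1).natAbs + 1 ∈ ps.map (fun p => (100 - p).natAbs + 1) :=
      List.mem_map.mpr ⟨q.1, hq1, rfl⟩
    have := List.le_sum_of_mem hmem
    omega
  calc dayOf q.1 q.2 ≤ ((100 - q.1).natAbs + 1 : Int) := hday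
    _ ≤ (fuelOf ps : Int) := by exact_mod_cast hsum

theorem dayOf_ge_one (p s : Int) : 1 ≤ dayOf p s := by
  unfold dayOf; split_ifs with h <;> omega

-- ===== VERDICT (by name: the statement is the Claim_ definition above) =====
theorem solution_spec : Claim_equal_solution := by
  intro ps ss _ hpre
  obtain ⟨hlen, hs, hsur⟩ := hpre
  unfold Spec_solution
  rw [solution_alt_eq_grp]
  unfold solution
  have hzlen : (ps.zip ss).length = ss.length := by
    rw [List.length_zip]; omega
  have htake : (ps.zip ss).map (fun q => q.1 + 0 * q.2) = ps.take ss.length := by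
    have h0 : (ps.zip ss).map (fun q => q.1 + 0 * q.2) = (ps.zip ss).map Prod.fst :=
      List.map_congr_left (fun a _ => by ring)
    rw [h0, zip_take_self ps ss, List.map_fst_zip (by simp)]
  have hsnd : (ps.zip ss).map (fun q => q.2) = ss := List.map_snd_zip hlen
  have hps : ps = (ps.zip ss).map (fun q => q.1 + 0 * q.2) ++ ps.drop ss.length := by
    rw [htake, List.take_append_drop]
  have hvis : List.replicate (ps.zip ss).length (0:Int) ++
      List.replicate (ps.drop ss.length).length 0 = List.replicate ps.length 0 := by
    rw [← List.replicate_add]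
    congr 1
    rw [hzlen, List.length_drop]
    omega
  have hmain := aLoop_spec (fuelOf ps) 0 [] [] (ps.zip ss) (ps.drop ss.length) []
    rfl le_rfl
    (fun q hq => hs q.2 (mem_zip_parts q ps ss hq).2)
    (by
      intro z hz
      cases hzz : ps.zip ss with
      | nil => simp [hzz] at hz
      | cons w ws =>
        rw [hzz] at hz
        simp only [List.head?_cons, Option.mem_def, Option.some.injEq] at hz
        subst hz
        have := dayOf_ge_one w.1 w.2
        omega)
    (by
      intro q hq
      have := fuelOf_ge ps ss hs q hq
      omega)
    (by
      intro t ht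
      have := hsur t ht
      omega)
  simp only [List.nil_append, List.length_nil, List.replicate_zero] at hmain
  rw [hsnd, ← hps, hvis] at hmain
  exact hmain
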